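-- pv_equiv track=rewrite | github.com/robnoflop/Schatsi | src/SCHATSI004.py | trigram_filtering
-- ===== SOURCE A (Python) =====
-- def trigram_filtering(trigram_list, stopwords):
--     trigram_list_filtered = []
--     trigram_count_filtered = []
--     # filter for duplicates
--     for element in trigram_list:
--         if element in trigram_list_filtered:
--             continue
--         elif element[0] not in stopwords and element[1] in stopwords and element[2] not in stopwords:
--             # filter for unuseful expressions like: "in the end", "trust is the",....
--             # RULE: Only trigrams, where the first AND the last word are no stopwords And the second word IS a stopword will be written into the filtered_list
--             # This is nessecary for trigrams like "Internet of Things" and other correct expressions with 3 words in it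
--             trigram_list_filtered.append(element)
--         else:
--             continue
--
--     # count total number of each trigram expression
--     for element in trigram_list_filtered:
--         counter = 0
--         for trigram in trigram_list:
--             if element == trigram:
--                 counter = counter + 1
--         trigram_count_filtered.append(counter)
--
--     # returning the list with the filtered trigram expressions and a list with the total number of each word
--     return trigram_list_filtered, trigram_count_filtered
-- ===== SOURCE B (Python) =====
-- def trigram_filtering(trigram_list, stopwords):
--     # one pass: insertion-ordered frequency dict keyed by the trigram
--     counts = {}
--     for element in trigram_list:
--         key = tuple(element)
--         counts[key] = counts.get(key, 0) + 1
--     trigram_list_filtered = []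
--     trigram_count_filtered = []
--     # second pass over the grouped unique trigrams only
--     for key, n in counts.items():
--         if key[0] not in stopwords and key[1] in stopwords and key[2] not in stopwords:
--             trigram_list_filtered.append(list(key))
--             trigram_count_filtered.append(n)
--     return trigram_list_filtered, trigram_count_filtered
-- ===== Notes on version B (the rewrite author's own statement) =====
-- stated objective: idiomatic
-- what changed: A dedups with a linear membership scan and then re-scans the whole input once per kept trigram to count; B builds an insertion-ordered frequency dict in one pass and iterates its grouped unique keys, applying the stopword rule once per distinct trigram.
import Mathlib
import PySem

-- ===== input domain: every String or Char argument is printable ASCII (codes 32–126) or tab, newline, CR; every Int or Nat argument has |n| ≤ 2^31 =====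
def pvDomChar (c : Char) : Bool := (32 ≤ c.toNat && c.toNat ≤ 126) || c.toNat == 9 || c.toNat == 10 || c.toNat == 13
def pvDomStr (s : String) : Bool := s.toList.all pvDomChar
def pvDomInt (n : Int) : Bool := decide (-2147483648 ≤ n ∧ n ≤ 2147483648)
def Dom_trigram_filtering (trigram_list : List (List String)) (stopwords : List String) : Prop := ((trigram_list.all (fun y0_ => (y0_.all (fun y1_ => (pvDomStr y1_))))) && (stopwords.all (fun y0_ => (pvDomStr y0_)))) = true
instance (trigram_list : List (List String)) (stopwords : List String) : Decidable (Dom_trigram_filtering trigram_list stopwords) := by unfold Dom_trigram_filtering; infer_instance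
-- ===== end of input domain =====

-- B replaces A's quadratic dedup-and-rescan with one insertion-ordered counting dict whose
-- grouped unique keys the stopword filter then traverses once (idiomatic restructuring).

-- shared stopword rule: element[0] not in sw and element[1] in sw and element[2] not in sw
-- (short-circuit exactly as Python; Pre_ keeps out the shapes where Python's indexing would raise)
def pvKeep (stopwords : List String) (e : List String) : Bool :=
  match e with
  | a :: b :: c :: _ => !stopwords.contains a && stopwords.contains b && !stopwords.contains c
  | _ => false

-- ===== PORT A =====
def trigram_filtering (trigram_list : List (List String)) (stopwords : List String) : List (List String) × List Int :=
  let trigram_list_filtered := trigram_list.foldl (fun acc element =>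
    if acc.contains element then acc
    else if pvKeep stopwords element then acc ++ [element]
    else acc) []
  let trigram_count_filtered := trigram_list_filtered.foldl (fun cs element =>
    cs ++ [trigram_list.foldl (fun counter trigram =>
      if element == trigram then counter + 1 else counter) (0 : Int)]) []
  (trigram_list_filtered, trigram_count_filtered)

-- ===== PORT B =====
def trigram_filtering_alt (trigram_list : List (List String)) (stopwords : List String) : List (List String) × List Int :=
  let counts : PySem.Dict (List String) Int :=
    trigram_list.foldl (fun d element => d.insert element (d.getD element 0 + 1)) PySem.Dict.empty
  counts.items.foldl (fun p kv =>
    if pvKeep stopwords kv.1 then (p.1 ++ [kv.1], p.2 ++ [kv.2]) else p) ([], [])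

-- ===== PRECONDITION & SPEC =====
-- Pre_ excludes exactly the inputs where Python's short-circuited indexing element[0]/[1]/[2]
-- raises IndexError in A (and likewise in B): an element shorter than 3 whose evaluated prefix
-- forces an out-of-range index.
def pvSafeElem (stopwords : List String) (e : List String) : Bool :=
  match e with
  | [] => false
  | [a] => stopwords.contains a
  | [a, b] => stopwords.contains a || !stopwords.contains b
  | _ :: _ :: _ :: _ => true

def Pre_trigram_filtering (trigram_list : List (List String)) (stopwords : List String) : Prop :=
  ∀ e ∈ trigram_list, pvSafeElem stopwords e = true
instance (trigram_list : List (List String)) (stopwords : List String) : Decidable (Pre_trigram_filtering trigram_list stopwords) := by unfold Pre_trigram_filtering; infer_instance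

def pvWitness_trigram_filtering : List (List String) × List String :=
  ([["internet", "of", "things"], ["internet", "of", "things"], ["in", "the", "end"]], ["of", "the", "in"])

def Spec_trigram_filtering (trigram_list : List (List String)) (stopwords : List String) (out : List (List String) × List Int) : Prop := out = trigram_filtering_alt trigram_list stopwords
instance (trigram_list : List (List String)) (stopwords : List String) (out : List (List String) × List Int) : Decidable (Spec_trigram_filtering trigram_list stopwords out) := by unfold Spec_trigram_filtering; infer_instance

-- ===== CLAIM (what is proved, stated in full; the proofs are below) =====
def Claim_equal_trigram_filtering : Prop := ∀ (trigram_list : List (List String)) (stopwords : List String), Dom_trigram_filtering trigram_list stopwords → Pre_trigram_filtering trigram_list stopwords → Spec_trigram_filtering trigram_list stopwords (trigram_filtering trigram_list stopwords)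

-- ===== LEMMAS AND PROOFS =====

-- A's dedup loop is the set-building fold over the kept elements
theorem pvA_filtered_eq (trigram_list : List (List String)) (stopwords : List String) :
    trigram_list.foldl (fun acc element =>
      if acc.contains element then acc
      else if pvKeep stopwords element then acc ++ [element]
      else acc) [] = PySem.Set.ofList (trigram_list.filter (pvKeep stopwords)) := by
  rw [PySem.Set.ofList_eq_foldl, ← PySem.List.foldl_if_eq_foldl_filter]
  apply PySem.List.foldl_congr_mem
  intro acc x _
  simp only [PySem.Set.add]
  split_ifs <;> simp_all [PySem.Set.contains]

-- first-occurrence dedup commutes with filter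
theorem pvSet_ofList_filter {α : Type} [BEq α] [LawfulBEq α] (p : α → Bool) (l : List α) :
    PySem.Set.ofList (l.filter p) = (PySem.Set.ofList l).filter p := by
  induction l using List.reverseRecOn with
  | nil => rfl
  | append_singleton xs x ih =>
    rw [List.filter_append, PySem.Set.ofList_eq_foldl, PySem.Set.ofList_eq_foldl,
        List.foldl_append, List.foldl_append, ← PySem.Set.ofList_eq_foldl, ← PySem.Set.ofList_eq_foldl]
    by_cases hp : p x = true
    · simp only [List.filter, hp, List.foldl, PySem.Set.add, ih]
      by_cases hm : x ∈ PySem.Set.ofList xs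
      · have : x ∈ (PySem.Set.ofList xs).filter p := List.mem_filter.2 ⟨hm, hp⟩
        simp [hm, this]
      · have : x ∉ (PySem.Set.ofList xs).filter p := fun h => hm (List.mem_filter.1 h).1
        simp [hm, this, List.filter_append, hp]
    · simp only [Bool.not_eq_true] at hp
      simp only [List.filter, hp, List.foldl, PySem.Set.add, ih]
      by_cases hm : x ∈ PySem.Set.ofList xs
      · simp [hm]
      · simp [hm, List.filter_append, hp]

-- the two-list accumulator loop of B, made explicit
theorem pvPairFold {α : Type} (q : α → Bool) (l : List (α × Int)) (acc₁ : List α) (acc₂ : List Int) :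
    l.foldl (fun p kv => if q kv.1 then (p.1 ++ [kv.1], p.2 ++ [kv.2]) else p) (acc₁, acc₂)
      = (acc₁ ++ (l.filter (fun kv => q kv.1)).map (·.1),
         acc₂ ++ (l.filter (fun kv => q kv.1)).map (·.2)) := by
  induction l generalizing acc₁ acc₂ with
  | nil => simp
  | cons kv t ih =>
    by_cases h : q kv.1 = true
    · simp [List.foldl, h, ih]
    · simp only [Bool.not_eq_true] at h
      simp [List.foldl, h, ih]

-- A's inner counting loop is List.count
theorem pvCount_loop (trigram_list : List (List String)) (e : List String) :
    trigram_list.foldl (fun counter trigram =>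
      if e == trigram then counter + 1 else counter) (0 : Int) = (trigram_list.count e : Int) := by
  have : ∀ t : List String, (e == t) = (t == e) := by
    intro t; simp [eq_comm]
  have h1 : trigram_list.foldl (fun counter trigram => if e == trigram then counter + 1 else counter) (0 : Int)
      = trigram_list.foldl (fun counter trigram => if trigram == e then counter + 1 else counter) (0 : Int) := by
    apply PySem.List.foldl_congr_mem
    intro acc x _
    rw [this x]
  rw [h1, PySem.List.foldl_beq_add_one]
  ring

-- ===== VERDICT (by name: the statement is the Claim_ definition above) =====
theorem trigram_filtering_spec : Claim_equal_trigram_filtering := by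
  intro tl sw _ _
  simp only [Spec_trigram_filtering, trigram_filtering, trigram_filtering_alt]
  rw [PySem.Dict.foldl_insert_getD_add_one_eq_counter, PySem.Dict.items_counter, pvPairFold,
      pvA_filtered_eq, pvSet_ofList_filter]
  simp only [List.filter_map, Function.comp_def, List.map_map, List.nil_append,
    Prod.mk.injEq]
  constructor
  · simp
  · rw [PySem.List.foldl_append_singleton_eq_map]
    simp only [List.nil_append]
    refine List.map_congr_left (fun e _ => ?_)
    exact pvCount_loop tl e
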